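-- pv_equiv track=rewrite | github.com/Hansil-Chapadiya/Leet_Code_Problems | MakeMountainArray_1671.py | minimum_removals_for_bitonic
-- ===== SOURCE A (Python) =====
-- from typing import List
--
-- def minimum_removals_for_bitonic(nums: List[int]) -> int:
--     n = len(nums)
--
-- #Step 1 : Find LIS ending at each index
--     lis = [1] * n  # longest increasing subsequence length up to each index
--     for i in range(1, n):
--         for j in range(i):
--             if nums[i] > nums[j]:
--                 lis[i] = max(lis[i], lis[j] + 1)
--
-- #Step 2 : Find LDS starting at each index
--     lds = [1] * n  # longest decreasing subsequence length from each index to the end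
--     for i in range(n-2, -1, -1):
--         for j in range(i+1, n):
--             if nums[i] > nums[j]:
--                 lds[i] = max(lds[i], lds[j] + 1)
--
-- #Step 3 : Calculate maximum bitonic subsequence length
--     max_bitonic_length = 0
--     for i in range(n):
-- #To form a bitonic sequence at index i, we need at least 1 element in both LIS and LDS
--         if lis[i] > 1 and lds[i] > 1:
--             max_bitonic_length = max(max_bitonic_length, lis[i] + lds[i] - 1)
--
-- #Step 4 : Minimum removals required to form the longest bitonic sequence
--     min_removals = n - max_bitonic_length
--     return min_removals
-- ===== SOURCE B (Python) =====
-- from typing import List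
--
-- def minimum_removals_for_bitonic(nums: List[int]) -> int:
--     # O(n log n): per-index LIS lengths via patience sorting with hand-rolled binary search.
--     def lis_ends(arr):
--         tails, dp = [], []
--         for x in arr:
--             lo, hi = 0, len(tails)
--             while lo < hi:
--                 mid = (lo + hi) // 2
--                 if tails[mid] < x:
--                     lo = mid + 1
--                 else:
--                     hi = mid
--             if lo == len(tails):
--                 tails.append(x)
--             else:
--                 tails[lo] = x
--             dp.append(lo + 1)
--         return dp
--
--     inc = lis_ends(nums)
--     dec = lis_ends(nums[::-1])[::-1]
--     best = 0
--     for a, b in zip(inc, dec):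
--         if a > 1 and b > 1:
--             best = max(best, a + b - 1)
--     return len(nums) - best
-- ===== Notes on version B (the rewrite author's own statement) =====
-- stated objective: faster
-- what changed: Replaces A's two O(n^2) nested-loop DP passes (per-index LIS and LDS) by patience sorting: one forward and one backward pass that maintain the strictly increasing 'tails' pile tops and place each element with a hand-written binary search, and the final index loop becomes a fold over zip(inc, dec).
import Mathlib
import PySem

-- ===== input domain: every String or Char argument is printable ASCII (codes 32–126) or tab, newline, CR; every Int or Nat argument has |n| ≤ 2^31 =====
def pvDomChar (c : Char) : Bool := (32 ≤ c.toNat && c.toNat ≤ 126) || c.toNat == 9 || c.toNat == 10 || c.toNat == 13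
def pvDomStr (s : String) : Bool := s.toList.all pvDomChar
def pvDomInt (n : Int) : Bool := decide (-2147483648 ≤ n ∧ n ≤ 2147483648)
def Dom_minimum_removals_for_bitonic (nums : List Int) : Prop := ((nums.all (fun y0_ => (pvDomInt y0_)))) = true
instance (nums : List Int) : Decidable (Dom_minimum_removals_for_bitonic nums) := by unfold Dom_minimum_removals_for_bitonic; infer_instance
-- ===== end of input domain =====

-- B replaces A's quadratic per-index LIS/LDS double loops by patience sorting with a
-- hand-written binary search (objective: faster, O(n log n) vs O(n^2)).

-- ===== PORT A =====
def minimum_removals_for_bitonic (nums : List Int) : Int :=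
  let n : Int := nums.length
  let lis : List Int :=
    (PySem.List.pyRange 1 n 1).foldl (fun lis i =>
      (PySem.List.pyRange 0 i 1).foldl (fun lis j =>
        if PySem.List.pyGetD nums i 0 > PySem.List.pyGetD nums j 0 then
          PySem.List.pySetD lis i (max (PySem.List.pyGetD lis i 0) (PySem.List.pyGetD lis j 0 + 1))
        else lis) lis)
      (List.replicate nums.length (1 : Int))
  let lds : List Int :=
    (PySem.List.pyRange (n - 2) (-1) (-1)).foldl (fun lds i =>
      (PySem.List.pyRange (i + 1) n 1).foldl (fun lds j =>
        if PySem.List.pyGetD nums i 0 > PySem.List.pyGetD nums j 0 then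
          PySem.List.pySetD lds i (max (PySem.List.pyGetD lds i 0) (PySem.List.pyGetD lds j 0 + 1))
        else lds) lds)
      (List.replicate nums.length (1 : Int))
  let maxb : Int :=
    (PySem.List.pyRange 0 n 1).foldl (fun m i =>
      if PySem.List.pyGetD lis i 0 > 1 ∧ PySem.List.pyGetD lds i 0 > 1 then
        max m (PySem.List.pyGetD lis i 0 + PySem.List.pyGetD lds i 0 - 1)
      else m) 0
  n - maxb

-- ===== PORT B =====
-- hand-written binary search of Source B (the 'while lo < hi' loop), ported step for step
def pvBisectLeft (tails : List Int) (x : Int) (lo hi : Nat) : Nat :=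
  if _h : lo < hi then
    let mid := (lo + hi) / 2
    if PySem.List.pyGetD tails (mid : Int) 0 < x then pvBisectLeft tails x (mid + 1) hi
    else pvBisectLeft tails x lo mid
  else lo
termination_by hi - lo
decreasing_by all_goals omega

-- Source B's lis_ends loop body: one element processed against the patience piles
def pvLisStep (s : List Int × List Int) (x : Int) : List Int × List Int :=
  let tails := s.1
  let lo := pvBisectLeft tails x 0 tails.length
  let tails' := if lo = tails.length then tails ++ [x] else tails.set lo x
  (tails', s.2 ++ [(lo : Int) + 1])

-- Source B's lis_ends: patience piles (tails) plus the per-index LIS lengths (dp)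
def pvLisEnds (arr : List Int) : List Int := (arr.foldl pvLisStep ([], [])).2

def minimum_removals_for_bitonic_alt (nums : List Int) : Int :=
  let inc := pvLisEnds nums
  let dec := (pvLisEnds nums.reverse).reverse
  let best : Int := (inc.zip dec).foldl (fun m p =>
    if p.1 > 1 ∧ p.2 > 1 then max m (p.1 + p.2 - 1) else m) 0
  (nums.length : Int) - best

-- ===== PRECONDITION & SPEC =====
def Spec_minimum_removals_for_bitonic (nums : List Int) (out : Int) : Prop := out = minimum_removals_for_bitonic_alt nums
instance (nums : List Int) (out : Int) : Decidable (Spec_minimum_removals_for_bitonic nums out) := by unfold Spec_minimum_removals_for_bitonic; infer_instance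

-- ===== CLAIM (what is proved, stated in full; the proofs are below) =====
def Claim_equal_minimum_removals_for_bitonic : Prop := ∀ (nums : List Int), Dom_minimum_removals_for_bitonic nums → Spec_minimum_removals_for_bitonic nums (minimum_removals_for_bitonic nums)

-- ===== LEMMAS AND PROOFS =====

-- reference DP: value of the longest strictly increasing subsequence ending at each index
def pvMaxd (acc : List (Int × Int)) (x : Int) : Int :=
  acc.foldl (fun m p => if p.1 < x then max m p.2 else m) 0

def pvAcc (xs : List Int) : List (Int × Int) :=
  xs.foldl (fun acc x => acc ++ [(x, pvMaxd acc x + 1)]) []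

def pvSpec (xs : List Int) : List Int := (pvAcc xs).map Prod.snd

theorem pvAcc_append (xs : List Int) (x : Int) :
    pvAcc (xs ++ [x]) = pvAcc xs ++ [(x, pvMaxd (pvAcc xs) x + 1)] := by
  simp [pvAcc, List.foldl_append]

theorem pvAcc_map_fst (xs : List Int) : (pvAcc xs).map Prod.fst = xs := by
  induction xs using List.reverseRecOn with
  | nil => rfl
  | append_singleton xs x ih => rw [pvAcc_append]; simp [ih]

theorem pvAcc_length (xs : List Int) : (pvAcc xs).length = xs.length := by
  have := congrArg List.length (pvAcc_map_fst xs); simpa using this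

theorem pvSpec_length (xs : List Int) : (pvSpec xs).length = xs.length := by
  simp [pvSpec, pvAcc_length]

theorem pvSpec_append (xs : List Int) (x : Int) :
    pvSpec (xs ++ [x]) = pvSpec xs ++ [pvMaxd (pvAcc xs) x + 1] := by
  simp [pvSpec, pvAcc_append]

theorem pvAcc_fst (xs : List Int) (k : Nat) (hk : k < xs.length) :
    ((pvAcc xs).getD k (0, 0)).1 = xs.getD k 0 := by
  have hk' : k < (pvAcc xs).length := by rw [pvAcc_length]; exact hk
  rw [List.getD_eq_getElem _ _ hk', List.getD_eq_getElem _ _ hk]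
  have := pvAcc_map_fst xs
  calc (pvAcc xs)[k].1 = ((pvAcc xs).map Prod.fst)[k]'(by simpa using hk') := by simp
    _ = xs[k] := by simp [this]

theorem pv_getD_take (l : List Int) (n k : Nat) (hk : k < n) (hk2 : k < l.length) :
    (l.take n).getD k 0 = l.getD k 0 := by
  rw [List.getD_eq_getElem _ _ (by simp; omega), List.getD_eq_getElem _ _ hk2]
  exact List.getElem_take

theorem pv_getD_drop (l : List Int) (n k : Nat) (hk : n + k < l.length) :
    (l.drop n).getD k 0 = l.getD (n + k) 0 := by
  rw [List.getD_eq_getElem _ _ (by simp; omega), List.getD_eq_getElem _ _ hk]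
  exact List.getElem_drop

theorem pv_getD_reverse (l : List Int) (k : Nat) (hk : k < l.length) :
    l.reverse.getD k 0 = l.getD (l.length - 1 - k) 0 := by
  rw [List.getD_eq_getElem _ _ (by simpa using hk), List.getD_eq_getElem _ _ (by omega)]
  exact List.getElem_reverse _

theorem pv_getD_reverse_pair (l : List (Int × Int)) (k : Nat) (hk : k < l.length) :
    l.reverse.getD k (0, 0) = l.getD (l.length - 1 - k) (0, 0) := by
  rw [List.getD_eq_getElem _ _ (by simpa using hk), List.getD_eq_getElem _ _ (by omega)]
  exact List.getElem_reverse _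

theorem pvAcc_snd (xs : List Int) (k : Nat) (hk : k < xs.length) :
    ((pvAcc xs).getD k (0, 0)).2 = (pvSpec xs).getD k 0 := by
  have hk' : k < (pvAcc xs).length := by rw [pvAcc_length]; exact hk
  have hk'' : k < (pvSpec xs).length := by rw [pvSpec_length]; exact hk
  rw [List.getD_eq_getElem _ _ hk', List.getD_eq_getElem _ _ hk'']
  simp [pvSpec]

-- characterisation of pvMaxd as a running max over the filtered dp values
theorem pvMaxd_eq (l : List (Int × Int)) (x : Int) :
    pvMaxd l x = ((l.filter (fun p => decide (p.1 < x))).map Prod.snd).foldl max 0 := by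
  rw [pvMaxd, PySem.List.foldl_ite_eq_foldl_filter, List.foldl_map]

theorem pvMaxd_nonneg (l : List (Int × Int)) (x : Int) : 0 ≤ pvMaxd l x := by
  rw [pvMaxd_eq]; exact (PySem.List.le_foldl_max _ _).1

theorem le_pvMaxd (l : List (Int × Int)) (x : Int) (p : Int × Int) (hp : p ∈ l) (hx : p.1 < x) :
    p.2 ≤ pvMaxd l x := by
  rw [pvMaxd_eq]
  exact (PySem.List.le_foldl_max _ _).2 _ (List.mem_map_of_mem (List.mem_filter.mpr ⟨hp, by simpa using hx⟩))

theorem pvMaxd_cases (l : List (Int × Int)) (x : Int) :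
    pvMaxd l x = 0 ∨ ∃ p ∈ l, p.1 < x ∧ pvMaxd l x = p.2 := by
  rw [pvMaxd_eq]
  rcases PySem.List.foldl_max_mem ((l.filter (fun p => decide (p.1 < x))).map Prod.snd) 0 with h | h
  · exact Or.inl h
  · rcases List.mem_map.mp h with ⟨p, hp, he⟩
    rcases List.mem_filter.mp hp with ⟨hpl, hpx⟩
    exact Or.inr ⟨p, hpl, by simpa using hpx, he.symm⟩

theorem pvMaxd_eq_of_mem_iff (l l' : List (Int × Int)) (x : Int)
    (h : ∀ p, p ∈ l ↔ p ∈ l') : pvMaxd l x = pvMaxd l' x := by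
  have aux : ∀ (a b : List (Int × Int)), (∀ p, p ∈ a → p ∈ b) → pvMaxd a x ≤ pvMaxd b x := by
    intro a b hab
    rcases pvMaxd_cases a x with h0 | ⟨p, hp, hlt, he⟩
    · rw [h0]; exact pvMaxd_nonneg b x
    · rw [he]; exact le_pvMaxd b x p (hab p hp) hlt
  exact le_antisymm (aux l l' fun p hp => (h p).mp hp) (aux l' l fun p hp => (h p).mpr hp)

theorem pvMaxd_reverse (l : List (Int × Int)) (x : Int) : pvMaxd l.reverse x = pvMaxd l x :=
  pvMaxd_eq_of_mem_iff _ _ _ (by simp)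

-- running max from 1 of (dp+1) equals 1 + running max from 0 of dp
theorem pvFoldl_shift (x : Int) (ps : List (Int × Int)) : ∀ m : Int,
    ps.foldl (fun c p => if p.1 < x then max c (p.2 + 1) else c) (m + 1)
      = ps.foldl (fun c p => if p.1 < x then max c p.2 else c) m + 1 := by
  induction ps with
  | nil => intro m; rfl
  | cons p t ih =>
    intro m
    simp only [List.foldl_cons]
    by_cases hc : p.1 < x
    · simp only [hc, if_true]
      rw [show max (m + 1) (p.2 + 1) = max m p.2 + 1 from max_add_add_right m p.2 1]
      exact ih (max m p.2)
    · simp only [hc, if_false]; exact ih m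

-- binary search: pvBisectLeft finds the threshold position
theorem pvBisectLeft_eq (tails : List Int) (x : Int) (c : Nat)
    (h1 : ∀ k, k < c → tails.getD k 0 < x)
    (h2 : ∀ k, c ≤ k → k < tails.length → ¬ tails.getD k 0 < x) :
    ∀ lo hi, lo ≤ c → c ≤ hi → hi ≤ tails.length → pvBisectLeft tails x lo hi = c := by
  suffices H : ∀ n lo hi, hi - lo ≤ n → lo ≤ c → c ≤ hi → hi ≤ tails.length →
      pvBisectLeft tails x lo hi = c by
    intro lo hi; exact H (hi - lo) lo hi le_rfl
  intro n
  induction n with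
  | zero =>
    intro lo hi hn hlc hch hht
    rw [pvBisectLeft]
    have : ¬ lo < hi := by omega
    simp only [this, dite_false]
    omega
  | succ n ih =>
    intro lo hi hn hlc hch hht
    rw [pvBisectLeft]
    by_cases hlh : lo < hi
    · simp only [hlh, dite_true]
      have hmid1 : lo ≤ (lo + hi) / 2 := by omega
      have hmid2 : (lo + hi) / 2 < hi := by omega
      rw [show PySem.List.pyGetD tails (((lo + hi) / 2 : Nat) : Int) 0
            = tails.getD ((lo + hi) / 2) 0 from PySem.List.pyGetD_natCast _ _ _]
      by_cases hcmp : tails.getD ((lo + hi) / 2) 0 < x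
      · simp only [hcmp, if_true]
        have hmc : (lo + hi) / 2 < c := by
          by_contra hge
          exact h2 _ (by omega) (by omega) hcmp
        exact ih _ _ (by omega) (by omega) hch hht
      · simp only [hcmp, if_false]
        have hcm : c ≤ (lo + hi) / 2 := by
          by_contra hlt
          exact hcmp (h1 _ (by omega))
        exact ih _ _ (by omega) hlc hcm (by omega)
    · simp only [hlh, dite_false]; omega

-- on a strictly increasing list, 'number of elements < x' is a threshold
theorem pvSorted_threshold (tails : List Int) (x : Int) (hs : tails.Pairwise (· < ·)) :
    (∀ k, k < tails.countP (fun t => decide (t < x)) → tails.getD k 0 < x) ∧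
    (∀ k, tails.countP (fun t => decide (t < x)) ≤ k → k < tails.length → ¬ tails.getD k 0 < x) := by
  induction tails with
  | nil => simp
  | cons t rest ih =>
    obtain ⟨hall, hrest⟩ := List.pairwise_cons.mp hs
    obtain ⟨ih1, ih2⟩ := ih hrest
    by_cases h : t < x
    · have hc : (t :: rest).countP (fun t => decide (t < x))
          = rest.countP (fun t => decide (t < x)) + 1 := by simp [List.countP_cons, h]
      simp only [hc]
      constructor
      · intro k hk
        cases k with
        | zero => rw [List.getD_cons_zero]; exact h
        | succ k => rw [List.getD_cons_succ]; exact ih1 k (by omega)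
      · intro k hk hkl
        cases k with
        | zero => omega
        | succ k =>
          rw [List.getD_cons_succ]
          exact ih2 k (by omega) (by simpa using hkl)
    · have hzero : rest.countP (fun t => decide (t < x)) = 0 := by
        rw [List.countP_eq_zero]
        intro y hy
        simp only [decide_eq_true_eq]
        have := hall y hy
        omega
      have hc : (t :: rest).countP (fun t => decide (t < x)) = 0 := by
        simp [List.countP_cons, h, hzero]
      simp only [hc]
      refine ⟨by omega, ?_⟩
      intro k _ hkl
      cases k with
      | zero => rw [List.getD_cons_zero]; exact h
      | succ k =>
        rw [List.getD_cons_succ]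
        have hkr : k < rest.length := by simpa using hkl
        rw [List.getD_eq_getElem _ _ hkr]
        have := hall _ (List.getElem_mem hkr)
        omega

-- the patience invariant
def pvInv (acc : List (Int × Int)) (tails : List Int) : Prop :=
  tails.Pairwise (· < ·) ∧
  (∀ p ∈ acc, ∃ k : Nat, p.2 = (k : Int) + 1 ∧ k < tails.length ∧ tails.getD k 0 ≤ p.1) ∧
  (∀ k : Nat, k < tails.length → ∃ p ∈ acc, p.2 = (k : Int) + 1 ∧ p.1 = tails.getD k 0)

theorem pvInv_nil : pvInv [] [] := by
  refine ⟨List.Pairwise.nil, by simp, by simp⟩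

theorem pv_getD_set (l : List Int) (c k : Nat) (x : Int) (hk : k < l.length) :
    (l.set c x).getD k 0 = if c = k then x else l.getD k 0 := by
  rw [List.getD_eq_getElem _ _ (by simpa using hk), List.getD_eq_getElem _ _ hk]
  simp [List.getElem_set]

theorem pvInv_step (acc : List (Int × Int)) (tails : List Int) (x : Int) (h : pvInv acc tails) :
    pvMaxd acc x = (tails.countP (fun t => decide (t < x)) : Int) ∧
    pvInv (acc ++ [(x, (tails.countP (fun t => decide (t < x)) : Int) + 1)])
      (if tails.countP (fun t => decide (t < x)) = tails.length
        then tails ++ [x] else tails.set (tails.countP (fun t => decide (t < x))) x) := by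
  obtain ⟨hs, hfwd, hbwd⟩ := h
  obtain ⟨t1, t2⟩ := pvSorted_threshold tails x hs
  set c := tails.countP (fun t => decide (t < x)) with hcdef
  have hcle : c ≤ tails.length := List.countP_le_length
  have hmaxd : pvMaxd acc x = (c : Int) := by
    apply le_antisymm
    · rcases pvMaxd_cases acc x with h0 | ⟨p, hp, hlt, he⟩
      · rw [h0]; positivity
      · obtain ⟨k, hk2, hklen, hkle⟩ := hfwd p hp
        have hkx : tails.getD k 0 < x := lt_of_le_of_lt hkle hlt
        have hkc : k < c := by
          by_contra hge
          exact t2 k (by omega) hklen hkx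
        rw [he, hk2]
        omega
    · rcases Nat.eq_zero_or_pos c with h0 | hpos
      · rw [h0]; exact_mod_cast pvMaxd_nonneg acc x
      · obtain ⟨p, hp, hp2, hp1⟩ := hbwd (c - 1) (by omega)
        have hx : p.1 < x := by rw [hp1]; exact t1 (c - 1) (by omega)
        have := le_pvMaxd acc x p hp hx
        rw [hp2] at this
        have hc1 : ((c - 1 : Nat) : Int) + 1 = (c : Int) := by omega
        omega
  refine ⟨hmaxd, ?_⟩
  by_cases hcl : c = tails.length
  · -- append case
    simp only [hcl, if_true]
    refine ⟨?_, ?_, ?_⟩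
    · rw [List.pairwise_append]
      refine ⟨hs, List.pairwise_singleton _ _, ?_⟩
      intro a ha b hb
      rcases List.mem_iff_getElem.mp ha with ⟨k, hk, rfl⟩
      have : tails.getD k 0 < x := t1 k (by omega)
      rw [List.getD_eq_getElem _ _ hk] at this
      simpa [List.mem_singleton.mp hb] using this
    · intro p hp
      rcases List.mem_append.mp hp with hpo | hpn
      · obtain ⟨k, hk2, hklen, hkle⟩ := hfwd p hpo
        refine ⟨k, hk2, by simp; omega, ?_⟩
        rwa [List.getD_append _ _ _ _ hklen]
      · rcases List.mem_singleton.mp hpn with rfl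
        refine ⟨tails.length, by simp [hcl], by simp, ?_⟩
        rw [List.getD_append_right _ _ _ _ (le_refl _)]
        simp
    · intro k hk
      rw [List.length_append, List.length_singleton] at hk
      rcases Nat.lt_or_ge k tails.length with hlt | hge
      · obtain ⟨p, hp, hp2, hp1⟩ := hbwd k hlt
        exact ⟨p, List.mem_append_left _ hp, hp2, by rwa [List.getD_append _ _ _ _ hlt]⟩
      · have hkeq : k = tails.length := by omega
        refine ⟨(x, (tails.length : Int) + 1), List.mem_append_right _ (by simp), by simp [hkeq], ?_⟩
        subst hkeq
        rw [List.getD_append_right _ _ _ _ (le_refl _)]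
        simp
  · -- set case
    have hclt : c < tails.length := by omega
    have hxc : x ≤ tails.getD c 0 := by
      have := t2 c (le_refl _) hclt
      omega
    simp only [hcl, if_false]
    refine ⟨?_, ?_, ?_⟩
    · rw [List.pairwise_iff_getElem]
      intro i j hi hj hij
      rw [List.length_set] at hi hj
      have hset : ∀ (m : Nat) (hm : m < (tails.set c x).length),
          (tails.set c x)[m] = if c = m then x else tails.getD m 0 := by
        intro m hm
        have hm' : m < tails.length := by simpa using hm
        rw [← List.getD_eq_getElem _ 0 hm, pv_getD_set _ _ _ _ hm']
      rw [hset i (by simpa using hi), hset j (by simpa using hj)]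
      have hpw : ∀ (a b : Nat) (ha : a < tails.length) (hb : b < tails.length), a < b →
          tails.getD a 0 < tails.getD b 0 := by
        intro a b ha hb hab
        rw [List.getD_eq_getElem _ _ ha, List.getD_eq_getElem _ _ hb]
        exact List.pairwise_iff_getElem.mp hs a b ha hb hab
      by_cases hic : c = i
      · rw [if_pos hic, if_neg (show ¬ c = j by omega)]
        exact lt_of_le_of_lt hxc (hpw c j hclt hj (by omega))
      · by_cases hjc : c = j
        · rw [if_neg hic, if_pos hjc]
          exact t1 i (by omega)
        · rw [if_neg hic, if_neg hjc]
          exact hpw i j hi hj hij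
    · intro p hp
      rcases List.mem_append.mp hp with hpo | hpn
      · obtain ⟨k, hk2, hklen, hkle⟩ := hfwd p hpo
        refine ⟨k, hk2, by simpa using hklen, ?_⟩
        rw [pv_getD_set _ _ _ _ hklen]
        by_cases hkc : c = k
        · subst hkc; simp only [if_true]; exact le_trans hxc hkle
        · simpa [hkc] using hkle
      · rcases List.mem_singleton.mp hpn with rfl
        refine ⟨c, rfl, by simpa using hclt, ?_⟩
        rw [pv_getD_set _ _ _ _ hclt]
        simp
    · intro k hk
      rw [List.length_set] at hk
      by_cases hkc : c = k
      · subst hkc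
        refine ⟨(x, (c : Int) + 1), List.mem_append_right _ (by simp), rfl, ?_⟩
        rw [pv_getD_set _ _ _ _ hk]
        simp
      · obtain ⟨p, hp, hp2, hp1⟩ := hbwd k hk
        refine ⟨p, List.mem_append_left _ hp, hp2, ?_⟩
        rw [pv_getD_set _ _ _ _ hk, if_neg hkc]
        exact hp1

theorem pvLisEnds_go (arr : List Int) : ∀ (pre : List Int) (tails : List Int),
    pvInv (pvAcc pre) tails →
    (arr.foldl pvLisStep (tails, pvSpec pre)).2 = pvSpec (pre ++ arr) ∧
    pvInv (pvAcc (pre ++ arr)) (arr.foldl pvLisStep (tails, pvSpec pre)).1 := by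
  induction arr with
  | nil =>
    intro pre tails h
    refine ⟨by simp, ?_⟩
    simpa using h
  | cons x t ih =>
    intro pre tails h
    have hs := h.1
    obtain ⟨tt1, tt2⟩ := pvSorted_threshold tails x hs
    have hbis : pvBisectLeft tails x 0 tails.length = tails.countP (fun t => decide (t < x)) :=
      pvBisectLeft_eq tails x _ tt1 tt2 0 tails.length (Nat.zero_le _) List.countP_le_length le_rfl
    obtain ⟨hm, hinv'⟩ := pvInv_step (pvAcc pre) tails x h
    have hacc : pvAcc (pre ++ [x])
        = pvAcc pre ++ [(x, (tails.countP (fun t => decide (t < x)) : Int) + 1)] := by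
      rw [pvAcc_append, hm]
    have hspec : pvSpec (pre ++ [x])
        = pvSpec pre ++ [(tails.countP (fun t => decide (t < x)) : Int) + 1] := by
      rw [pvSpec_append, hm]
    have hstep : pvLisStep (tails, pvSpec pre) x
        = (if tails.countP (fun t => decide (t < x)) = tails.length then tails ++ [x]
            else tails.set (tails.countP (fun t => decide (t < x))) x, pvSpec (pre ++ [x])) := by
      simp only [pvLisStep, hbis, hspec]
    rw [List.foldl_cons, hstep]
    have h2 := ih (pre ++ [x]) _ (by rw [hacc]; exact hinv')
    rwa [List.append_assoc, List.singleton_append] at h2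

theorem pvLisEnds_eq (arr : List Int) : pvLisEnds arr = pvSpec arr := by
  have h := (pvLisEnds_go arr [] [] pvInv_nil).1
  simpa [pvLisEnds] using h

theorem pv_set_mid (S : List Int) (c v : Int) (R : List Int) :
    (S ++ c :: R).set S.length v = S ++ v :: R := by
  induction S with
  | nil => rfl
  | cons s ss ih => simpa using ih

theorem pv_get_mid (S : List Int) (c : Int) (R : List Int) :
    PySem.List.pyGetD (S ++ c :: R) ((S.length : Nat) : Int) 0 = c := by
  rw [PySem.List.pyGetD_natCast, List.getD_append_right _ _ _ _ le_rfl]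
  simp

-- generic inner loop of A: a scan over earlier dp values that maxes into position i,
-- described by the (value, dp) pairs ps it reads
theorem pvInner (nums : List Int) (i : Int) (hi0 : 0 ≤ i) :
    ∀ (ps : List (Int × Int)) (a : Nat) (b : Int) (S R : List Int) (cur : Int),
    b = (a : Int) + ps.length →
    S.length = i.toNat →
    (∀ k : Nat, k < ps.length →
      PySem.List.pyGetD nums ((a : Int) + (k : Int)) 0 = (ps.getD k (0, 0)).1) →
    (∀ (k : Nat) (c : Int), k < ps.length →
      PySem.List.pyGetD (S ++ c :: R) ((a : Int) + (k : Int)) 0 = (ps.getD k (0, 0)).2) →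
    (PySem.List.pyRange (a : Int) b 1).foldl
        (fun lis j => if PySem.List.pyGetD nums i 0 > PySem.List.pyGetD nums j 0
          then PySem.List.pySetD lis i
            (max (PySem.List.pyGetD lis i 0) (PySem.List.pyGetD lis j 0 + 1))
          else lis)
        (S ++ cur :: R)
      = S ++ (ps.foldl (fun c p =>
          if PySem.List.pyGetD nums i 0 > p.1 then max c (p.2 + 1) else c) cur) :: R := by
  intro ps
  induction ps with
  | nil =>
    intro a b S R cur hb hS h1 h2
    rw [PySem.List.pyRange_one_eq_nil (by simp [hb])]
    rfl
  | cons p t ih =>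
    intro a b S R cur hb hS h1 h2
    have hab : (a : Int) < b := by rw [hb]; simp only [List.length_cons]; push_cast; omega
    rw [PySem.List.pyRange_one_cons hab, List.foldl_cons]
    have hread : PySem.List.pyGetD nums (a : Int) 0 = p.1 := by
      have := h1 0 (by simp)
      simpa using this
    have hmidI : ((S.length : Nat) : Int) = i := by omega
    have hcurread : PySem.List.pyGetD (S ++ cur :: R) i 0 = cur := by
      rw [← hmidI]; exact pv_get_mid S cur R
    have hset : ∀ v : Int, PySem.List.pySetD (S ++ cur :: R) i v = S ++ v :: R := by
      intro v
      rw [PySem.List.pySetD_of_nonneg _ _ hi0, ← hS, pv_set_mid]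
    have hstepstate :
        (if PySem.List.pyGetD nums i 0 > PySem.List.pyGetD nums (a : Int) 0
          then PySem.List.pySetD (S ++ cur :: R) i
            (max (PySem.List.pyGetD (S ++ cur :: R) i 0)
              (PySem.List.pyGetD (S ++ cur :: R) (a : Int) 0 + 1))
          else (S ++ cur :: R))
        = S ++ (if PySem.List.pyGetD nums i 0 > p.1 then max cur (p.2 + 1) else cur) :: R := by
      rw [hread, hcurread]
      have hread2 : PySem.List.pyGetD (S ++ cur :: R) (a : Int) 0 = p.2 := by
        have := h2 0 cur (by simp)
        simpa using this
      by_cases hcond : PySem.List.pyGetD nums i 0 > p.1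
      · rw [if_pos hcond, if_pos hcond, hset, hread2]
      · rw [if_neg hcond, if_neg hcond]
    rw [hstepstate]
    have h1' : ∀ k : Nat, k < t.length →
        PySem.List.pyGetD nums (((a + 1 : Nat) : Int) + (k : Int)) 0 = (t.getD k (0, 0)).1 := by
      intro k hk
      have := h1 (k + 1) (by simp; omega)
      rw [show ((a : Int) + ((k + 1 : Nat) : Int)) = ((a + 1 : Nat) : Int) + (k : Int) by
        push_cast; ring] at this
      simpa [List.getD_cons_succ] using this
    have h2' : ∀ (k : Nat) (c : Int), k < t.length →
        PySem.List.pyGetD (S ++ c :: R) (((a + 1 : Nat) : Int) + (k : Int)) 0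
          = (t.getD k (0, 0)).2 := by
      intro k c hk
      have := h2 (k + 1) c (by simp; omega)
      rw [show ((a : Int) + ((k + 1 : Nat) : Int)) = ((a + 1 : Nat) : Int) + (k : Int) by
        push_cast; ring] at this
      simpa [List.getD_cons_succ] using this
    have hb' : b = ((a + 1 : Nat) : Int) + t.length := by
      rw [hb]; push_cast; simp; ring
    have := ih (a + 1) b S R
      (if PySem.List.pyGetD nums i 0 > p.1 then max cur (p.2 + 1) else cur) hb' hS h1' h2'
    rw [show ((a : Int) + 1) = ((a + 1 : Nat) : Int) by push_cast; ring]
    exact this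

-- A's step 1: the double loop fills lis with the per-index LIS values
theorem pvLisA (nums : List Int) :
    ∀ (i : Nat), 1 ≤ i → i ≤ nums.length →
    (PySem.List.pyRange 1 (i : Int) 1).foldl
      (fun lis i =>
        (PySem.List.pyRange 0 i 1).foldl (fun lis j =>
          if PySem.List.pyGetD nums i 0 > PySem.List.pyGetD nums j 0 then
            PySem.List.pySetD lis i
              (max (PySem.List.pyGetD lis i 0) (PySem.List.pyGetD lis j 0 + 1))
          else lis) lis)
      (List.replicate nums.length (1 : Int))
    = pvSpec (nums.take i) ++ List.replicate (nums.length - i) 1 := by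
  intro i h1 h2
  induction i, h1 using Nat.le_induction with
  | base =>
    rw [PySem.List.pyRange_one_eq_nil (by norm_num)]
    obtain ⟨y, rest, rfl⟩ : ∃ y rest, nums = y :: rest := by
      cases nums with
      | nil => simp at h2
      | cons y rest => exact ⟨y, rest, rfl⟩
    simp [pvSpec, pvAcc, pvMaxd, List.replicate_succ]
  | succ i hi ih =>
    have hii : (1 : Int) ≤ (i : Int) := by push_cast; omega
    rw [show ((i + 1 : Nat) : Int) = (i : Int) + 1 by push_cast; ring,
        PySem.List.pyRange_one_succ_right hii, List.foldl_append, ih (by omega)]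
    simp only [List.foldl_cons, List.foldl_nil]
    have hilen : i < nums.length := by omega
    have hSlen : (pvSpec (nums.take i)).length = i := by
      rw [pvSpec_length, List.length_take]; omega
    have hpslen : (pvAcc (nums.take i)).length = i := by
      rw [pvAcc_length, List.length_take]; omega
    rw [show nums.length - i = (nums.length - (i + 1)) + 1 by omega, List.replicate_succ]
    have happly := pvInner nums (i : Int) (by positivity) (pvAcc (nums.take i)) 0 (i : Int)
        (pvSpec (nums.take i)) (List.replicate (nums.length - (i + 1)) 1) 1
        (by rw [hpslen]; push_cast; ring)
        (by rw [hSlen]; simp)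
        (by
          intro k hk
          rw [hpslen] at hk
          rw [show ((0 : Nat) : Int) + (k : Int) = ((k : Nat) : Int) by push_cast; ring,
              PySem.List.pyGetD_natCast,
              pvAcc_fst _ k (by rw [List.length_take]; omega),
              pv_getD_take nums i k (by omega) (by omega)])
        (by
          intro k c hk
          rw [hpslen] at hk
          rw [show ((0 : Nat) : Int) + (k : Int) = ((k : Nat) : Int) by push_cast; ring,
              PySem.List.pyGetD_natCast,
              List.getD_append _ _ _ _ (by rw [hSlen]; omega),
              pvAcc_snd _ k (by rw [List.length_take]; omega)])
    rw [Nat.cast_zero] at happly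
    rw [happly]
    have hx : PySem.List.pyGetD nums (i : Int) 0 = nums[i] := by
      rw [PySem.List.pyGetD_natCast, List.getD_eq_getElem _ _ hilen]
    have hfold : (pvAcc (nums.take i)).foldl
        (fun c p => if PySem.List.pyGetD nums (i : Int) 0 > p.1 then max c (p.2 + 1) else c) 1
        = pvMaxd (pvAcc (nums.take i)) (PySem.List.pyGetD nums (i : Int) 0) + 1 := by
      simpa [pvMaxd] using
        pvFoldl_shift (PySem.List.pyGetD nums (i : Int) 0) (pvAcc (nums.take i)) 0
    rw [hfold, hx]
    have htake : nums.take (i + 1) = nums.take i ++ [nums[i]] := by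
      rw [List.take_add_one]
      simp [List.getElem?_eq_getElem hilen]
    rw [htake, pvSpec_append]
    simp [List.append_assoc]

-- A's step 2: the backward double loop fills lds; it is the LIS DP of the reversed list
theorem pvLdsA (nums : List Int) :
    ∀ t : Nat, t + 1 ≤ nums.length →
    (PySem.List.pyRange ((t : Int) - 1) (-1) (-1)).foldl
      (fun lds i =>
        (PySem.List.pyRange (i + 1) (nums.length : Int) 1).foldl (fun lds j =>
          if PySem.List.pyGetD nums i 0 > PySem.List.pyGetD nums j 0 then
            PySem.List.pySetD lds i
              (max (PySem.List.pyGetD lds i 0) (PySem.List.pyGetD lds j 0 + 1))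
          else lds) lds)
      (List.replicate t (1 : Int) ++ (pvSpec ((nums.drop t).reverse)).reverse)
    = (pvSpec nums.reverse).reverse := by
  intro t
  induction t with
  | zero =>
    intro _
    rw [show ((0 : Nat) : Int) - 1 = -1 by norm_num,
        PySem.List.pyRange_neg_one_eq_nil (by norm_num)]
    simp
  | succ t ih =>
    intro ht
    have htlen : t < nums.length := by omega
    rw [show ((t + 1 : Nat) : Int) - 1 = (t : Int) by push_cast; ring,
        PySem.List.pyRange_neg_one_cons (by push_cast; omega), List.foldl_cons]
    have hstate : List.replicate (t + 1) (1 : Int)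
          ++ (pvSpec ((nums.drop (t + 1)).reverse)).reverse
        = List.replicate t (1 : Int)
          ++ (1 : Int) :: (pvSpec ((nums.drop (t + 1)).reverse)).reverse := by
      rw [List.replicate_succ', List.append_assoc]; rfl
    rw [hstate]
    have hlen' : ((nums.drop (t + 1)).reverse).length = nums.length - (t + 1) := by simp
    have hpslen : ((pvAcc ((nums.drop (t + 1)).reverse)).reverse).length
        = nums.length - (t + 1) := by
      rw [List.length_reverse, pvAcc_length, hlen']
    have hacclen : (pvAcc ((nums.drop (t + 1)).reverse)).length = nums.length - (t + 1) := by
      rw [pvAcc_length, hlen']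
    have happly := pvInner nums (t : Int) (by positivity)
        ((pvAcc ((nums.drop (t + 1)).reverse)).reverse) (t + 1) (nums.length : Int)
        (List.replicate t (1 : Int)) ((pvSpec ((nums.drop (t + 1)).reverse)).reverse) 1
        (by rw [hpslen]; push_cast; omega)
        (by simp)
        (by
          intro k hk
          rw [hpslen] at hk
          rw [show ((t + 1 : Nat) : Int) + (k : Int) = ((t + 1 + k : Nat) : Int) by
                push_cast; ring,
              PySem.List.pyGetD_natCast,
              pv_getD_reverse_pair _ k (by rw [hacclen]; omega),
              show (pvAcc ((nums.drop (t + 1)).reverse)).length - 1 - k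
                  = nums.length - (t + 1) - 1 - k by rw [hacclen],
              pvAcc_fst _ _ (by rw [hlen']; omega),
              pv_getD_reverse _ _ (by simp; omega),
              show (nums.drop (t + 1)).length - 1 - (nums.length - (t + 1) - 1 - k)
                  = k by simp; omega,
              pv_getD_drop _ _ _ (by omega)])
        (by
          intro k c hk
          rw [hpslen] at hk
          rw [show ((t + 1 : Nat) : Int) + (k : Int) = ((t + 1 + k : Nat) : Int) by
                push_cast; ring,
              PySem.List.pyGetD_natCast,
              List.getD_append_right _ _ _ _ (by simp; omega),
              List.length_replicate,
              show t + 1 + k - t = k + 1 by omega,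
              List.getD_cons_succ,
              pv_getD_reverse _ _ (by rw [pvSpec_length, hlen']; omega),
              show (pvSpec ((nums.drop (t + 1)).reverse)).length - 1 - k
                  = nums.length - (t + 1) - 1 - k by rw [pvSpec_length, hlen'],
              pv_getD_reverse_pair _ k (by rw [hacclen]; omega),
              show (pvAcc ((nums.drop (t + 1)).reverse)).length - 1 - k
                  = nums.length - (t + 1) - 1 - k by rw [hacclen],
              pvAcc_snd _ _ (by rw [hlen']; omega)])
    rw [show ((t + 1 : Nat) : Int) = (t : Int) + 1 by push_cast; ring] at happly
    rw [happly]
    have hx : PySem.List.pyGetD nums (t : Int) 0 = nums[t] := by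
      rw [PySem.List.pyGetD_natCast, List.getD_eq_getElem _ _ htlen]
    have hfold : ((pvAcc ((nums.drop (t + 1)).reverse)).reverse).foldl
        (fun c p => if PySem.List.pyGetD nums (t : Int) 0 > p.1 then max c (p.2 + 1) else c) 1
        = pvMaxd (pvAcc ((nums.drop (t + 1)).reverse)) (PySem.List.pyGetD nums (t : Int) 0)
            + 1 := by
      simp only [gt_iff_lt]
      rw [← pvMaxd_reverse]
      have h1 := pvFoldl_shift (PySem.List.pyGetD nums (t : Int) 0)
        ((pvAcc ((nums.drop (t + 1)).reverse)).reverse) 0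
      rw [show (0 : Int) + 1 = 1 by ring] at h1
      exact h1
    rw [hfold, hx]
    have hdrop : (nums.drop t).reverse = (nums.drop (t + 1)).reverse ++ [nums[t]] := by
      rw [List.drop_eq_getElem_cons htlen, List.reverse_cons]
    have hnew : List.replicate t (1 : Int)
          ++ (pvMaxd (pvAcc ((nums.drop (t + 1)).reverse)) nums[t] + 1)
            :: (pvSpec ((nums.drop (t + 1)).reverse)).reverse
        = List.replicate t (1 : Int) ++ (pvSpec ((nums.drop t).reverse)).reverse := by
      rw [hdrop, pvSpec_append]
      simp
    rw [hnew]
    exact ih (by omega)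

-- step 3 of A reads lis/lds by index; B folds over their zip: the two loops agree
theorem pvFoldZip (g : Int → Int → Int → Int) (xs ys : List Int) (h : ys.length = xs.length)
    (init : Int) :
    ∀ m : Nat, m ≤ xs.length →
    (PySem.List.pyRange 0 (m : Int) 1).foldl
      (fun acc i => g acc (PySem.List.pyGetD xs i 0) (PySem.List.pyGetD ys i 0)) init
    = ((xs.take m).zip (ys.take m)).foldl (fun acc p => g acc p.1 p.2) init := by
  intro m
  induction m with
  | zero =>
    intro _
    rw [show ((0 : Nat) : Int) = 0 by norm_num, PySem.List.pyRange_one_eq_nil le_rfl]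
    simp
  | succ m ih =>
    intro hm
    rw [show ((m + 1 : Nat) : Int) = (m : Int) + 1 by push_cast; ring,
        PySem.List.pyRange_one_succ_right (by positivity), List.foldl_append, ih (by omega)]
    simp only [List.foldl_cons, List.foldl_nil]
    have hmx : m < xs.length := by omega
    have hmy : m < ys.length := by omega
    have htx : xs.take (m + 1) = xs.take m ++ [xs[m]] := by
      rw [List.take_add_one]; simp [List.getElem?_eq_getElem hmx]
    have hty : ys.take (m + 1) = ys.take m ++ [ys[m]] := by
      rw [List.take_add_one]; simp [List.getElem?_eq_getElem hmy]
    rw [htx, hty, List.zip_append (by rw [List.length_take, List.length_take]; omega),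
        List.foldl_append]
    simp only [List.zip_cons_cons, List.zip_nil_left, List.foldl_cons, List.foldl_nil]
    rw [PySem.List.pyGetD_natCast, PySem.List.pyGetD_natCast,
        List.getD_eq_getElem _ _ hmx, List.getD_eq_getElem _ _ hmy]

theorem minimum_removals_for_bitonic_spec' : ∀ (nums : List Int),
    minimum_removals_for_bitonic nums = minimum_removals_for_bitonic_alt nums := by
  intro nums
  by_cases hn : nums.length = 0
  · have hnil : nums = [] := List.length_eq_zero_iff.mp hn
    subst hnil
    rfl
  · have hn1 : 1 ≤ nums.length := by omega
    simp only [minimum_removals_for_bitonic, minimum_removals_for_bitonic_alt]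
    -- step 1: the lis array is the per-index LIS DP
    have hlis := pvLisA nums nums.length hn1 le_rfl
    rw [List.take_length, Nat.sub_self, List.replicate_zero, List.append_nil] at hlis
    -- step 2: the lds array is the reversed LIS DP of the reversed list
    have hlds := pvLdsA nums (nums.length - 1) (by omega)
    have hdrop : nums.drop (nums.length - 1) = [nums[nums.length - 1]] := by
      rw [List.drop_eq_getElem_cons (by omega), show nums.length - 1 + 1 = nums.length by omega,
          List.drop_length]
    rw [hdrop, show ((nums.length - 1 : Nat) : Int) - 1 = (nums.length : Int) - 2 by omega]
      at hlds
    have hone : (pvSpec ([nums[nums.length - 1]] : List Int).reverse).reverse = [1] := by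
      simp [pvSpec, pvAcc, pvMaxd]
    rw [hone, show List.replicate (nums.length - 1) (1 : Int) ++ [1]
          = List.replicate nums.length (1 : Int) by
        rw [← List.replicate_succ', show nums.length - 1 + 1 = nums.length by omega]] at hlds
    rw [hlis, hlds]
    -- step 3: reading lis/lds by index equals folding over their zip
    have hlen1 : (pvSpec nums).length = nums.length := pvSpec_length nums
    have hlen2 : ((pvSpec nums.reverse).reverse).length = nums.length := by
      rw [List.length_reverse, pvSpec_length, List.length_reverse]
    have hzip := pvFoldZip (fun m u v => if u > 1 ∧ v > 1 then max m (u + v - 1) else m)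
        (pvSpec nums) ((pvSpec nums.reverse).reverse) (by rw [hlen1, hlen2]) 0
        nums.length (by rw [hlen1])
    rw [List.take_of_length_le (le_of_eq hlen1), List.take_of_length_le (le_of_eq hlen2)] at hzip
    rw [hzip, pvLisEnds_eq, pvLisEnds_eq]

-- ===== VERDICT (by name: the statement is the Claim_ definition above) =====
theorem minimum_removals_for_bitonic_spec : Claim_equal_minimum_removals_for_bitonic := by
  intro nums _
  unfold Spec_minimum_removals_for_bitonic
  exact minimum_removals_for_bitonic_spec' nums
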